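-- pv_equiv track=rewrite | github.com/SierraJY/alg_py | bronze/모의고사.py | solution
-- ===== SOURCE A (Python) =====
-- def solution(answers):
--     FIR = (1, 2, 3, 4, 5)
--     LEN_F = len(FIR)
--
--     SEC = (2, 1, 2, 3, 2, 4, 2, 5)
--     LEN_S = len(SEC)
--
--     THR = (3, 3, 1, 1, 2, 2, 4, 4, 5, 5)
--     LEN_T = len(THR)
--
--     cor_cnts = [0, 0, 0]  # 각 학생 맞춘 갯수
--
--     for n, a in enumerate(answers):
--         if a == FIR[n % LEN_F]: cor_cnts[0] += 1
--         if a == SEC[n % LEN_S]: cor_cnts[1] += 1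
--         if a == THR[n % LEN_T]: cor_cnts[2] += 1
--
--     max_cor = max(cor_cnts)
--
--     return [i + 1 for i in range(3) if cor_cnts[i] == max_cor]
-- ===== SOURCE B (Python) =====
-- def _score(answers, pat):
--     # compare against a rotating pattern: head match, then rotate pattern left by one
--     s = 0
--     for a in answers:
--         s += (a == pat[0])
--         pat = pat[1:] + pat[:1]
--     return s
--
-- def solution(answers):
--     counts = [_score(answers, list(p)) for p in
--               ((1, 2, 3, 4, 5),
--                (2, 1, 2, 3, 2, 4, 2, 5),
--                (3, 3, 1, 1, 2, 2, 4, 4, 5, 5))]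
--     m = max(counts)
--     return [i + 1 for i in range(3) if counts[i] == m]
-- ===== Notes on version B (the rewrite author's own statement) =====
-- stated objective: alternative
-- what changed: Each student's score is computed in its own pass with a helper that rotates the pattern list one step per answer, instead of one interleaved loop indexing all three patterns by n % len.
import Mathlib
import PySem

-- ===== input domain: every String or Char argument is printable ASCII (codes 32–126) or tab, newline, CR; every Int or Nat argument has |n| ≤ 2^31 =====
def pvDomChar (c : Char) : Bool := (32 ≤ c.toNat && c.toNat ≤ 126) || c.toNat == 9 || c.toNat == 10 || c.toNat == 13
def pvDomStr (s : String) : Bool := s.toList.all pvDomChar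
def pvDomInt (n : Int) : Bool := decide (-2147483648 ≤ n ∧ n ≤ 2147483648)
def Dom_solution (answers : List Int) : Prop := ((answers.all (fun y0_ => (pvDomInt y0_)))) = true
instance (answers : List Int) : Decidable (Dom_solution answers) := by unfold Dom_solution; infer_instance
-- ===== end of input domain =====

-- B computes each student's score in its own pass with a rotating-pattern helper,
-- instead of A's single interleaved loop indexing the three patterns by n % len (alternative decomposition).

-- ===== PORT A =====
-- one loop over enumerate(answers), three modular-index checks updating a triple of counters
def solution (answers : List Int) : List Int :=
  let fir : List Int := [1, 2, 3, 4, 5]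
  let sec : List Int := [2, 1, 2, 3, 2, 4, 2, 5]
  let thr : List Int := [3, 3, 1, 1, 2, 2, 4, 4, 5, 5]
  let c := (PySem.List.enumerate answers).foldl
    (fun (c : Int × Int × Int) (p : Int × Int) =>
      let c0 := if p.2 = PySem.List.pyGetD fir (PySem.Int.mod p.1 5) 0 then c.1 + 1 else c.1
      let c1 := if p.2 = PySem.List.pyGetD sec (PySem.Int.mod p.1 8) 0 then c.2.1 + 1 else c.2.1
      let c2 := if p.2 = PySem.List.pyGetD thr (PySem.Int.mod p.1 10) 0 then c.2.2 + 1 else c.2.2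
      (c0, c1, c2)) (0, 0, 0)
  let m := (PySem.List.max? [c.1, c.2.1, c.2.2] (fun x => x)).getD 0
  (if c.1 = m then [1] else []) ++ (if c.2.1 = m then [2] else []) ++ (if c.2.2 = m then [3] else [])

-- ===== PORT B =====
-- helper _score: fold carrying (sum, current rotation of the pattern)
def rotScore (answers pat : List Int) : Int :=
  (answers.foldl
    (fun (s : Int × List Int) a =>
      (s.1 + (if a = s.2.headD 0 then 1 else 0), s.2.drop 1 ++ s.2.take 1))
    (0, pat)).1

def solution_alt (answers : List Int) : List Int :=
  let counts := [rotScore answers [1, 2, 3, 4, 5],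
                 rotScore answers [2, 1, 2, 3, 2, 4, 2, 5],
                 rotScore answers [3, 3, 1, 1, 2, 2, 4, 4, 5, 5]]
  let m := (PySem.List.max? counts (fun x => x)).getD 0
  (if counts.getD 0 0 = m then [1] else []) ++
  (if counts.getD 1 0 = m then [2] else []) ++
  (if counts.getD 2 0 = m then [3] else [])

-- ===== PRECONDITION & SPEC =====
def Spec_solution (answers : List Int) (out : List Int) : Prop := out = solution_alt answers
instance (answers : List Int) (out : List Int) : Decidable (Spec_solution answers out) := by unfold Spec_solution; infer_instance

-- ===== CLAIM (what is proved, stated in full; the proofs are below) =====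
def Claim_equal_solution : Prop := ∀ (answers : List Int), Dom_solution answers → Spec_solution answers (solution answers)

-- ===== LEMMAS AND PROOFS =====

/-- the common mathematical count: matches of `answers` against `p` cycled, starting at index `n` -/
def patCount : List Int → Nat → List Int → Int
  | [], _, _ => 0
  | a :: rest, n, p => (if a = p.getD (n % p.length) 0 then 1 else 0) + patCount rest (n + 1) p

theorem pyGetD_pymod (xs : List Int) (k : Nat) (m : Int) (hm : 0 < m) :
    PySem.List.pyGetD xs (PySem.Int.mod (k : Int) m) 0 = xs.getD (k % m.toNat) 0 := by
  have h : PySem.Int.mod (k : Int) m = ((k % m.toNat : Nat) : Int) := by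
    simp only [PySem.Int.mod]
    rw [Int.fmod_eq_emod, if_pos (Or.inl (le_of_lt hm)), add_zero, Int.natCast_mod,
      Int.toNat_of_nonneg (le_of_lt hm)]
  rw [h, PySem.List.pyGetD_natCast]

theorem solution_foldA (answers : List Int) : ∀ (k : Nat) (c0 c1 c2 : Int),
    (PySem.List.enumerate answers (k : Int)).foldl
      (fun (c : Int × Int × Int) (p : Int × Int) =>
        let c0 := if p.2 = PySem.List.pyGetD ([1,2,3,4,5] : List Int) (PySem.Int.mod p.1 5) 0 then c.1 + 1 else c.1
        let c1 := if p.2 = PySem.List.pyGetD ([2,1,2,3,2,4,2,5] : List Int) (PySem.Int.mod p.1 8) 0 then c.2.1 + 1 else c.2.1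
        let c2 := if p.2 = PySem.List.pyGetD ([3,3,1,1,2,2,4,4,5,5] : List Int) (PySem.Int.mod p.1 10) 0 then c.2.2 + 1 else c.2.2
        (c0, c1, c2)) (c0, c1, c2)
    = (c0 + patCount answers k [1,2,3,4,5],
       c1 + patCount answers k [2,1,2,3,2,4,2,5],
       c2 + patCount answers k [3,3,1,1,2,2,4,4,5,5]) := by
  induction answers with
  | nil => intro k c0 c1 c2; simp [PySem.List.enumerate_nil, patCount]
  | cons a rest ih =>
    intro k c0 c1 c2
    rw [PySem.List.enumerate_cons, List.foldl_cons]
    simp only [show ((k : Int) + 1) = ((k + 1 : Nat) : Int) by push_cast; ring,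
      pyGetD_pymod _ k 5 (by norm_num), pyGetD_pymod _ k 8 (by norm_num),
      pyGetD_pymod _ k 10 (by norm_num),
      show ((5:Int).toNat) = 5 from rfl, show ((8:Int).toNat) = 8 from rfl,
      show ((10:Int).toNat) = 10 from rfl, ih]
    simp only [patCount, List.length_cons, List.length_nil]
    norm_num
    refine ⟨?_, ?_, ?_⟩ <;> split_ifs <;> ring

theorem solution_foldB (p : List Int) (hp : p ≠ []) (answers : List Int) :
    ∀ (k : Nat) (s : Int),
    (answers.foldl
      (fun (st : Int × List Int) a =>
        (st.1 + (if a = st.2.headD 0 then 1 else 0), st.2.drop 1 ++ st.2.take 1))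
      (s, p.rotate k)).1 = s + patCount answers k p := by
  induction answers with
  | nil => intro k s; simp [patCount]
  | cons a rest ih =>
    intro k s
    have hlen : 0 < p.length := List.length_pos_iff.mpr hp
    have hl : 0 < (p.rotate k).length := by simpa using hlen
    have hhead : (p.rotate k).headD 0 = p.getD (k % p.length) 0 := by
      have h1 : (p.rotate k).headD 0 = (p.rotate k)[0]'hl := by
        rw [List.headD_eq_head?, List.head?_eq_getElem?, List.getElem?_eq_getElem hl]
        rfl
      have h2 : (p.rotate k)[0]'hl = p[(0 + k) % p.length]'(Nat.mod_lt _ hlen) :=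
        List.getElem_rotate p k 0 hl
      rw [h1, h2, List.getD_eq_getElem _ _ (Nat.mod_lt _ hlen)]
      simp
    have hrot : (p.rotate k).drop 1 ++ (p.rotate k).take 1 = p.rotate (k + 1) := by
      have hle : 1 ≤ (p.rotate k).length := hl
      rw [← List.rotate_eq_drop_append_take hle, List.rotate_rotate]
    rw [List.foldl_cons]
    simp only []
    rw [hrot, ih (k + 1) (s + (if a = (p.rotate k).headD 0 then 1 else 0))]
    simp only [patCount, hhead]
    ring

-- ===== VERDICT (by name: the statement is the Claim_ definition above) =====
theorem solution_spec : Claim_equal_solution := by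
  intro answers _
  show solution answers = solution_alt answers
  simp only [solution, solution_alt, rotScore]
  have hA := solution_foldA answers 0 0 0 0
  have hB1 := solution_foldB [1,2,3,4,5] (by simp) answers 0 0
  have hB2 := solution_foldB [2,1,2,3,2,4,2,5] (by simp) answers 0 0
  have hB3 := solution_foldB [3,3,1,1,2,2,4,4,5,5] (by simp) answers 0 0
  simp only [List.rotate_zero] at hB1 hB2 hB3
  simp only [Nat.cast_zero] at hA
  rw [hA]
  simp only [hB1, hB2, hB3]
  simp
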